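-- pv_equiv track=rewrite | github.com/dgarciacavero/WordlistInteligente | WordlistInteligente.py | generador_combi_apellidos
-- ===== SOURCE A (Python) =====
-- from itertools import permutations, product, combinations
--
-- def combinaciones(lista_strings, minimo):
--     #Nueva lista que añade mayusculas y minusculas. Cada elemento de una lista es una tupla con las dos opciones
--     #si en mayusculas y minusculas es igual (un numero/fecha) se añade una tupla de solo un elemento para evitar combinaciones repetidas
--     lista_modificada = []
--     for item in lista_strings:
--         # Añade la versión en minúsculas y en mayúsculas si son diferentes.
--         item_lower = item.lower()
--         item_cap = item.capitalize()
--         if item_lower != item_cap: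
--             lista_modificada.append((item_lower, item_cap))
--         else:
--             lista_modificada.append((item_lower,))
--     # Todos los tamaños de posibles combinaciones
--     for r in range(minimo, len(lista_modificada) + 1):
--         # Se hacen todas las permutaciones de la lista modificada, de tamaño r
--         for perm in permutations(lista_modificada, r):
--             # itertools.product toma un número variable de argumentos (*perm)
--             # Cada argumento es una tupla con las versiones en mayúsculas y minúsculas de una palabra
--             for prod in product(*perm):
--                 # Se excluyen casos de la misma palabra en mayúscula y minúscula
--                 if len(set(map(str.lower, prod))) == r:
--                     yield "".join(prod)
--
-- def generador_combi_apellidos(diccionario):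
--     if diccionario.get("apellidos"):
--         apellidos = diccionario.get("apellidos")
--         letras = []
--         for apellido in apellidos:
--             letras.append(apellido[0])
--         yield from combinaciones(letras,1)
--     yield ""
-- ===== SOURCE B (Python) =====
-- def generador_combi_apellidos(diccionario):
--     # Backtracking with duplicate-letter pruning instead of permutations+product+filter.
--     out = []
--     apellidos = diccionario.get("apellidos")
--     if apellidos:
--         cases = []
--         for a in apellidos:
--             lo = a[0].lower()
--             up = a[0].upper()
--             cases.append((lo,) if lo == up else (lo, up))
--
--         def expand(tuples, prefix):
--             if not tuples:
--                 out.append(prefix)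
--                 return
--             for c in tuples[0]:
--                 expand(tuples[1:], prefix + c)
--
--         def backtrack(remaining, used, r, chosen):
--             if r == 0:
--                 expand(chosen, "")
--                 return
--             for i, t in enumerate(remaining):
--                 lo = t[0]
--                 if lo in used:
--                     continue
--                 backtrack(remaining[:i] + remaining[i + 1:], used | {lo}, r - 1, chosen + [t])
--
--         for r in range(1, len(cases) + 1):
--             backtrack(cases, set(), r, [])
--     out.append("")
--     return out
-- ===== Notes on version B (the rewrite author's own statement) =====
-- stated objective: alternative
-- what changed: Replaces the permutations+product+generate-and-filter pipeline with a recursive backtracking search that prunes repeated lowercase initials while choosing positions and expands case variants only for valid permutations, instead of filtering every generated product with a per-product set.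
import Mathlib
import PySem

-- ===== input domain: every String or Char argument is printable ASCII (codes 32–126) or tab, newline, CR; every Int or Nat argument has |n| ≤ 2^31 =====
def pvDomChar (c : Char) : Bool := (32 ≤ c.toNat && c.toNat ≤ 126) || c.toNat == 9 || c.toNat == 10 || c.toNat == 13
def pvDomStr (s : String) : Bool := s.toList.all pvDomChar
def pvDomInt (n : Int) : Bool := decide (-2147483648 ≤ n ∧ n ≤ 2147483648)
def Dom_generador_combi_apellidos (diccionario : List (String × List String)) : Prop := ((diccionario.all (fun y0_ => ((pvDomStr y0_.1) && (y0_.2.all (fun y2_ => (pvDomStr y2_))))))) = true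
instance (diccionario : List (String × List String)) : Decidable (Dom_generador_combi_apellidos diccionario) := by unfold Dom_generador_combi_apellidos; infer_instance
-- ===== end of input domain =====

-- B replaces A's permutations+product+generate-and-filter pipeline by a backtracking search
-- that prunes repeated lowercase initials while choosing positions (objective: alternative).

-- ===== PORT A =====

-- hand port of str.capitalize (exact on the ASCII domain, where titlecase = uppercase)
def pyCapitalize (s : String) : String :=
  match s.toList with
  | [] => String.ofList []
  | c :: rest => String.ofList (PySem.Chars.upperChar c :: PySem.Chars.lower rest)

-- the body of A's first loop: the 1- or 2-element case tuple for one item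
def combTuple (item : String) : List String :=
  let item_lower := PySem.Str.lower item
  let item_cap := pyCapitalize item
  if item_lower ≠ item_cap then [item_lower, item_cap] else [item_lower]

-- itertools.product(*ts) in emission order (last factor varies fastest)
def pyProduct (ts : List (List String)) : List (List String) :=
  match ts with
  | [] => [[]]
  | t :: rest => t.flatMap (fun x => (pyProduct rest).map (fun p => x :: p))

def combinaciones (lista_strings : List String) (minimo : Nat) : List String :=
  let lista_modificada := lista_strings.map combTuple
  (List.range' minimo (lista_modificada.length + 1 - minimo)).flatMap (fun r =>
    (PySem.List.permutations lista_modificada r).flatMap (fun perm =>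
      ((pyProduct perm).filter
        (fun prod => (PySem.Set.ofList (prod.map PySem.Str.lower)).length == r)).map
        (PySem.Str.join "")))

def generador_combi_apellidos (diccionario : List (String × List String)) : List String :=
  match PySem.Dict.get? (PySem.Dict.mk diccionario) "apellidos" with
  | some apellidos =>
    if List.isEmpty apellidos then [""]
    else
      let letras := apellidos.map (fun apellido =>
        match PySem.Str.pyGet? apellido 0 with
        | some c => String.ofList [c]
        | none => "")  -- apellido[0] raises IndexError on "": excluded by Pre_
      combinaciones letras 1 ++ [""]
  | none => [""]

-- ===== PORT B =====

-- Source B's expand: all case-variant expansions of the chosen tuples, appended to prefix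
def altExpand (tuples : List (List String)) (pre : String) : List String :=
  match tuples with
  | [] => [pre]
  | t :: rest => t.flatMap (fun c => altExpand rest (pre ++ c))

-- Source B's backtrack: choose r tuples in index order, pruning repeated lowercase letters
def altBacktrack (remaining : List (List String)) (used : PySem.Set String) (r : Nat)
    (chosen : List (List String)) : List String :=
  match r with
  | 0 => altExpand chosen ""
  | r' + 1 =>
    (List.range remaining.length).flatMap (fun i =>
      match remaining[i]? with
      | none => []
      | some t =>
        let lo := t.headD ""
        if PySem.Set.contains used lo then []
        else altBacktrack (remaining.eraseIdx i) (PySem.Set.add used lo) r' (chosen ++ [t]))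

def generador_combi_apellidos_alt (diccionario : List (String × List String)) : List String :=
  match PySem.Dict.get? (PySem.Dict.mk diccionario) "apellidos" with
  | some apellidos =>
    if List.isEmpty apellidos then [""]
    else
      let cases := apellidos.map (fun a =>
        let c0 := match PySem.Str.pyGet? a 0 with
                  | some c => String.ofList [c]
                  | none => ""  -- a[0] raises IndexError on "": excluded by Pre_
        let lo := PySem.Str.lower c0
        let up := PySem.Str.upper c0
        if lo == up then [lo] else [lo, up])
      (List.range' 1 cases.length).flatMap (fun r => altBacktrack cases [] r []) ++ [""]
  | none => [""]

-- ===== PRECONDITION & SPEC =====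

-- Pre_ excludes only inputs on which A raises IndexError: an empty surname string
-- in the "apellidos" list (apellido[0]).
def Pre_generador_combi_apellidos (diccionario : List (String × List String)) : Prop :=
  ∀ s ∈ (PySem.Dict.get? (PySem.Dict.mk diccionario) "apellidos").getD [], s ≠ ""

instance (diccionario : List (String × List String)) : Decidable (Pre_generador_combi_apellidos diccionario) := by unfold Pre_generador_combi_apellidos; infer_instance

def pvWitness_generador_combi_apellidos : (List (String × List String)) :=
  [("apellidos", ["Ana", "bo", "Cruz"])]

def Spec_generador_combi_apellidos (diccionario : List (String × List String)) (out : List String) : Prop := out = generador_combi_apellidos_alt diccionario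
instance (diccionario : List (String × List String)) (out : List String) : Decidable (Spec_generador_combi_apellidos diccionario out) := by unfold Spec_generador_combi_apellidos; infer_instance

-- ===== CLAIM (what is proved, stated in full; the proofs are below) =====
def Claim_equal_generador_combi_apellidos : Prop := ∀ (diccionario : List (String × List String)), Dom_generador_combi_apellidos diccionario → Pre_generador_combi_apellidos diccionario → Spec_generador_combi_apellidos diccionario (generador_combi_apellidos diccionario)

-- ===== LEMMAS AND PROOFS =====

theorem char_le_toNat {c d : Char} : c ≤ d ↔ c.toNat ≤ d.toNat := by
  rw [Char.le_def]; exact UInt32.le_iff_toNat_le ..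

theorem lowerChar_upperChar (c : Char) :
    PySem.Chars.lowerChar (PySem.Chars.upperChar c) = PySem.Chars.lowerChar c := by
  have e1 : 'a'.toNat = 97 := rfl
  have e2 : 'z'.toNat = 122 := rfl
  have e3 : 'A'.toNat = 65 := rfl
  have e4 : 'Z'.toNat = 90 := rfl
  unfold PySem.Chars.upperChar PySem.Chars.islower
  by_cases h1 : 'a' ≤ c ∧ c ≤ 'z'
  · have ha : (97:Nat) ≤ c.toNat := e1 ▸ char_le_toNat.mp h1.1
    have hb : c.toNat ≤ 122 := e2 ▸ char_le_toNat.mp h1.2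
    have ht : (Char.ofNat (c.toNat - 32)).toNat = c.toNat - 32 := by
      rw [Char.toNat_ofNat, if_pos (Or.inl (by omega))]
    rw [if_pos (by simp [h1.1, h1.2])]
    unfold PySem.Chars.lowerChar PySem.Chars.isupper
    rw [if_pos (by simp only [Bool.and_eq_true, decide_eq_true_eq]
                   exact ⟨char_le_toNat.mpr (by omega), char_le_toNat.mpr (by omega)⟩)]
    rw [if_neg (by simp only [Bool.and_eq_true, decide_eq_true_eq]
                   rintro ⟨x, y⟩
                   have := char_le_toNat.mp y
                   omega)]
    rw [ht]
    have h32 : c.toNat - 32 + 32 = c.toNat := by omega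
    rw [h32, Char.ofNat_toNat]
  · rw [if_neg (by simp only [Bool.and_eq_true, decide_eq_true_eq]; exact h1)]

theorem lowerChar_idem (c : Char) :
    PySem.Chars.lowerChar (PySem.Chars.lowerChar c) = PySem.Chars.lowerChar c := by
  have e3 : 'A'.toNat = 65 := rfl
  have e4 : 'Z'.toNat = 90 := rfl
  by_cases h1 : 'A' ≤ c ∧ c ≤ 'Z'
  · have ha : (65:Nat) ≤ c.toNat := e3 ▸ char_le_toNat.mp h1.1
    have hb : c.toNat ≤ 90 := e4 ▸ char_le_toNat.mp h1.2
    have ht : (Char.ofNat (c.toNat + 32)).toNat = c.toNat + 32 := by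
      rw [Char.toNat_ofNat, if_pos (Or.inl (by omega))]
    conv_lhs => rw [PySem.Chars.lowerChar]
    rw [show PySem.Chars.lowerChar c = Char.ofNat (c.toNat + 32) by
          unfold PySem.Chars.lowerChar PySem.Chars.isupper
          rw [if_pos (by simp [h1.1, h1.2])]]
    rw [if_neg (by unfold PySem.Chars.isupper
                   simp only [Bool.and_eq_true, decide_eq_true_eq]
                   rintro ⟨x, y⟩
                   have hy := char_le_toNat.mp y
                   rw [ht] at hy
                   omega)]
  · rw [show PySem.Chars.lowerChar c = c by
          unfold PySem.Chars.lowerChar PySem.Chars.isupper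
          rw [if_neg (by simp only [Bool.and_eq_true, decide_eq_true_eq]; exact h1)]]
    unfold PySem.Chars.lowerChar PySem.Chars.isupper
    rw [if_neg (by simp only [Bool.and_eq_true, decide_eq_true_eq]; exact h1)]

-- a tuple is coherent: nonempty, and every element lowercases to its head
def Coh (t : List String) : Prop := t ≠ [] ∧ ∀ s ∈ t, PySem.Str.lower s = t.headD ""

-- B's pruning condition as a predicate on a candidate permutation
def validFrom (used : PySem.Set String) : List (List String) → Bool
  | [] => true
  | t :: ps => !(PySem.Set.contains used (t.headD "")) && validFrom (PySem.Set.add used (t.headD "")) ps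

theorem pyCapitalize_single (c : Char) :
    pyCapitalize (String.ofList [c]) = String.ofList [PySem.Chars.upperChar c] := by
  simp [pyCapitalize, PySem.Chars.lower]

theorem lower_single (c : Char) :
    PySem.Str.lower (String.ofList [c]) = String.ofList [PySem.Chars.lowerChar c] := by
  simp [PySem.Str.lower, PySem.Chars.lower]

theorem upper_single (c : Char) :
    PySem.Str.upper (String.ofList [c]) = String.ofList [PySem.Chars.upperChar c] := by
  simp [PySem.Str.upper, PySem.Chars.upper]

theorem combTuple_single (c : Char) :
    combTuple (String.ofList [c]) =
      (if PySem.Str.lower (String.ofList [c]) == PySem.Str.upper (String.ofList [c])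
       then [PySem.Str.lower (String.ofList [c])]
       else [PySem.Str.lower (String.ofList [c]), PySem.Str.upper (String.ofList [c])]) := by
  rw [combTuple, pyCapitalize_single, ← upper_single]
  by_cases h : PySem.Str.lower (String.ofList [c]) = PySem.Str.upper (String.ofList [c])
  · simp [h]
  · simp [h]

theorem coh_combTuple_single (c : Char) : Coh (combTuple (String.ofList [c])) := by
  rw [combTuple, pyCapitalize_single, ← upper_single, lower_single, upper_single]
  have h1 : PySem.Str.lower (String.ofList [PySem.Chars.lowerChar c]) =
      String.ofList [PySem.Chars.lowerChar c] := by
    rw [lower_single, lowerChar_idem]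
  have h2 : PySem.Str.lower (String.ofList [PySem.Chars.upperChar c]) =
      String.ofList [PySem.Chars.lowerChar c] := by
    rw [lower_single, lowerChar_upperChar]
  by_cases h : String.ofList [PySem.Chars.lowerChar c] = String.ofList [PySem.Chars.upperChar c]
  · rw [if_neg (by simp [h])]
    refine ⟨by simp, ?_⟩
    intro s hs
    rw [List.mem_singleton] at hs
    subst hs
    simpa using h1
  · rw [if_pos (by simp [h])]
    refine ⟨by simp, ?_⟩
    intro s hs
    rcases List.mem_cons.mp hs with h' | h'
    · subst h'; simpa using h1
    · rw [List.mem_singleton] at h'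
      subst h'
      simpa using h2

theorem mem_pyProduct_map_lower {perm : List (List String)} (hc : ∀ t ∈ perm, Coh t)
    {p : List String} (hp : p ∈ pyProduct perm) :
    p.map PySem.Str.lower = perm.map (fun t => t.headD "") := by
  induction perm generalizing p with
  | nil => simp [pyProduct] at hp; simp [hp]
  | cons t rest ih =>
    simp only [pyProduct, List.mem_flatMap, List.mem_map] at hp
    obtain ⟨x, hx, q, hq, rfl⟩ := hp
    have hct := hc t (by simp)
    simp only [List.map_cons]
    rw [hct.2 x hx, ih (fun u hu => hc u (by simp [hu])) hq]

theorem len_ofList_eq_iff (l : List String) :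
    (PySem.Set.ofList l).length = l.length ↔ l.Nodup := by
  constructor
  · intro h
    have h1 : (PySem.Set.ofList l).toFinset = l.toFinset := by
      apply Finset.ext
      intro x
      simp [List.mem_toFinset, PySem.Set.mem_ofList]
    have h2 : (PySem.Set.ofList l).length = (PySem.Set.ofList l).toFinset.card :=
      (List.toFinset_card_of_nodup (PySem.Set.nodup_ofList l)).symm
    have h1c : (PySem.Set.ofList l).toFinset.card = l.toFinset.card := by rw [h1]
    have h3 : l.toFinset.card = l.dedup.length := by
      rw [List.card_toFinset]
    have h4 : l.dedup.length = l.length := by omega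
    rw [← (List.dedup_sublist l).eq_of_length h4]
    exact List.nodup_dedup l
  · intro h; rw [PySem.Set.ofList_eq_self_of_nodup l h]

theorem validFrom_iff (used : PySem.Set String) (ps : List (List String)) :
    validFrom used ps = true ↔
      ((ps.map (fun t => t.headD "")).Nodup ∧
        ∀ k ∈ ps.map (fun t => t.headD ""), ¬ (k ∈ used)) := by
  induction ps generalizing used with
  | nil => simp [validFrom]
  | cons t rest ih =>
    simp only [validFrom, Bool.and_eq_true, Bool.not_eq_true', ih, List.map_cons,
      List.nodup_cons, List.mem_cons, List.mem_map]
    constructor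
    · rintro ⟨hnc, hnd, hdisj⟩
      have hncm : t.headD "" ∉ used := by
        intro hmem
        rw [show PySem.Set.contains used (t.headD "") = true by
              simpa [PySem.Set.contains, List.contains_iff_mem] using hmem] at hnc
        simp at hnc
      refine ⟨⟨?_, hnd⟩, ?_⟩
      · intro hmem
        obtain ⟨u, hu, he⟩ := hmem
        have := hdisj (t.headD "") ⟨u, hu, he⟩
        rw [PySem.Set.mem_add] at this
        exact this (Or.inr rfl)
      · intro k hk
        rcases hk with hk | ⟨u, hu, he⟩
        · rw [hk]; exact hncm
        · intro hmem
          have := hdisj k ⟨u, hu, he⟩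
          rw [PySem.Set.mem_add] at this
          exact this (Or.inl hmem)
    · rintro ⟨⟨hhd, hnd⟩, hdisj⟩
      have hncm : t.headD "" ∉ used := hdisj _ (Or.inl rfl)
      refine ⟨?_, hnd, ?_⟩
      · simp only [PySem.Set.contains]
        rw [Bool.eq_false_iff]
        intro hc
        exact hncm (by simpa [List.contains_iff_mem] using hc)
      · intro k hk
        rw [PySem.Set.mem_add]
        rintro (hmem | rfl)
        · exact hdisj k (Or.inr hk) hmem
        · exact hhd hk

theorem mem_permutations_length {xs : List (List String)} {r : Nat} {p : List (List String)}
    (hp : p ∈ PySem.List.permutations xs r) : p.length = r := by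
  induction r generalizing xs p with
  | zero => simp [PySem.List.permutations] at hp; simp [hp]
  | succ r' ih =>
    rw [PySem.List.permutations] at hp
    simp only [List.mem_flatMap, List.mem_range] at hp
    obtain ⟨i, hi, hmem⟩ := hp
    rw [List.getElem?_eq_getElem hi] at hmem
    simp only [List.mem_map] at hmem
    obtain ⟨q, hq, rfl⟩ := hmem
    simp [ih hq]

theorem mem_permutations_subset {xs : List (List String)} {r : Nat} {p : List (List String)}
    (hp : p ∈ PySem.List.permutations xs r) : ∀ t ∈ p, t ∈ xs := by
  induction r generalizing xs p with
  | zero => simp [PySem.List.permutations] at hp; simp [hp]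
  | succ r' ih =>
    rw [PySem.List.permutations] at hp
    simp only [List.mem_flatMap, List.mem_range] at hp
    obtain ⟨i, hi, hmem⟩ := hp
    rw [List.getElem?_eq_getElem hi] at hmem
    simp only [List.mem_map] at hmem
    obtain ⟨q, hq, rfl⟩ := hmem
    intro t ht
    rcases List.mem_cons.mp ht with rfl | ht'
    · exact List.getElem_mem hi
    · exact List.eraseIdx_subset (ih hq t ht')

theorem join_empty_cons (x : String) (xs : List String) :
    PySem.Str.join "" (x :: xs) = x ++ PySem.Str.join "" xs := by
  apply String.toList_inj.mp
  rw [PySem.Str.toList_join]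
  cases xs with
  | nil => simp [PySem.Chars.join, List.intercalate]
  | cons y ys =>
    rw [String.toList_append, PySem.Str.toList_join]
    simp [PySem.Chars.join_cons_cons]

theorem altExpand_eq (ts : List (List String)) (pre : String) :
    altExpand ts pre = (pyProduct ts).map (fun p => pre ++ PySem.Str.join "" p) := by
  induction ts generalizing pre with
  | nil =>
    simp [altExpand, pyProduct]
    apply String.toList_inj.mp
    rw [String.toList_append, PySem.Str.toList_join]
    simp [PySem.Chars.join, List.intercalate]
  | cons t rest ih =>
    simp only [altExpand, pyProduct, List.map_flatMap]
    apply List.flatMap_congr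
    intro x _
    rw [ih, List.map_map]
    apply List.map_congr_left
    intro p _
    simp only [Function.comp_def]
    rw [join_empty_cons, ← String.append_assoc]

theorem flatMap_if_filter {α β : Type} (l : List α) (p : α → Bool) (g : α → List β) :
    (l.flatMap (fun x => if p x then g x else [])) = (l.filter p).flatMap g := by
  induction l with
  | nil => rfl
  | cons x xs ih =>
    by_cases h : p x
    · simp [h, ih]
    · simp [h, ih]

theorem altBacktrack_eq (r : Nat) (remaining : List (List String)) (used : PySem.Set String)
    (chosen : List (List String)) :
    altBacktrack remaining used r chosen =
      ((PySem.List.permutations remaining r).filter (validFrom used)).flatMap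
        (fun perm => altExpand (chosen ++ perm) "") := by
  induction r generalizing remaining used chosen with
  | zero =>
    simp [altBacktrack, PySem.List.permutations, validFrom]
  | succ r' ih =>
    rw [altBacktrack, PySem.List.permutations, List.filter_flatMap, List.flatMap_assoc]
    apply List.flatMap_congr
    intro i hi
    rw [List.mem_range] at hi
    rw [List.getElem?_eq_getElem hi]
    simp only []
    by_cases h : PySem.Set.contains used ((remaining[i]).headD "")
    · rw [if_pos h]
      rw [List.filter_map]
      have : (fun p : List (List String) => validFrom used (remaining[i] :: p)) = fun _ => false := by
        funext p
        simp only [validFrom, h, Bool.not_true, Bool.false_and]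
      simp only [Function.comp_def, this, List.filter_false, List.map_nil, List.flatMap_nil]
    · rw [if_neg h]
      rw [ih, List.filter_map, List.flatMap_map]
      have hf : PySem.Set.contains used ((remaining[i]).headD "") = false := by
        rwa [Bool.not_eq_true] at h
      have : (fun p : List (List String) => validFrom used (remaining[i] :: p)) =
          fun p => validFrom (PySem.Set.add used ((remaining[i]).headD "")) p := by
        funext p
        simp only [validFrom, hf, Bool.not_false, Bool.true_and]
      simp only [Function.comp_def, this]
      apply List.flatMap_congr
      intro q _
      congr 1
      simp

theorem perRank_eq (lm : List (List String)) (hc : ∀ t ∈ lm, Coh t) (r : Nat) :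
    (PySem.List.permutations lm r).flatMap (fun perm =>
      ((pyProduct perm).filter
        (fun prod => (PySem.Set.ofList (prod.map PySem.Str.lower)).length == r)).map
        (PySem.Str.join "")) =
    altBacktrack lm [] r [] := by
  rw [altBacktrack_eq]
  rw [← flatMap_if_filter]
  apply List.flatMap_congr
  intro perm hperm
  have hlen : perm.length = r := mem_permutations_length hperm
  have hcperm : ∀ t ∈ perm, Coh t := fun t ht => hc t (mem_permutations_subset hperm t ht)
  have hkey : ∀ p ∈ pyProduct perm,
      (PySem.Set.ofList (p.map PySem.Str.lower)).length =
        (PySem.Set.ofList (perm.map (fun t => t.headD ""))).length := by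
    intro p hp
    rw [mem_pyProduct_map_lower hcperm hp]
  by_cases hv : validFrom [] perm = true
  · rw [if_pos hv]
    obtain ⟨hnd, -⟩ := (validFrom_iff [] perm).mp hv
    have hlenk : (PySem.Set.ofList (perm.map (fun t => t.headD ""))).length =
        (perm.map (fun t => t.headD "")).length := (len_ofList_eq_iff _).mpr hnd
    have hfe : ((pyProduct perm).filter
        (fun prod => (PySem.Set.ofList (prod.map PySem.Str.lower)).length == r)) =
        pyProduct perm := by
      apply List.filter_eq_self.mpr
      intro p hp
      simp only [beq_iff_eq]
      rw [hkey p hp, hlenk, List.length_map, hlen]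
    rw [hfe, altExpand_eq]
    simp only [List.nil_append]
    apply List.map_congr_left
    intro p _
    rw [String.empty_append]
  · rw [if_neg (by simpa using hv)]
    have hnd : ¬ (perm.map (fun t => t.headD "")).Nodup := by
      intro hnd
      exact hv ((validFrom_iff [] perm).mpr ⟨hnd, by intro k _ hk; simp at hk⟩)
    have hfe : ((pyProduct perm).filter
        (fun prod => (PySem.Set.ofList (prod.map PySem.Str.lower)).length == r)) = [] := by
      rw [List.filter_eq_nil_iff]
      intro p hp
      simp only [beq_iff_eq]
      rw [hkey p hp]
      intro heq
      apply hnd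
      apply (len_ofList_eq_iff _).mp
      rw [heq, List.length_map, hlen]
    rw [hfe]
    rfl

theorem pyGet_zero_of_ne_empty {a : String} (h : a ≠ "") :
    ∃ c cs, a.toList = c :: cs ∧ PySem.Str.pyGet? a 0 = some c := by
  cases e : a.toList with
  | nil => exact absurd (String.toList_inj.mp (by simp [e])) h
  | cons c cs => exact ⟨c, cs, rfl, by simp [PySem.Str.pyGet?, e, PySem.Chars.pyGet?]⟩

theorem main_eq (apellidos : List String) (hpre : ∀ s ∈ apellidos, s ≠ "") :
    combinaciones (apellidos.map (fun apellido =>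
        match PySem.Str.pyGet? apellido 0 with
        | some c => String.ofList [c]
        | none => "")) 1 =
    (List.range' 1 (apellidos.map (fun a =>
        let c0 := match PySem.Str.pyGet? a 0 with
                  | some c => String.ofList [c]
                  | none => ""
        let lo := PySem.Str.lower c0
        let up := PySem.Str.upper c0
        if lo == up then [lo] else [lo, up])).length).flatMap
      (fun r => altBacktrack (apellidos.map (fun a =>
        let c0 := match PySem.Str.pyGet? a 0 with
                  | some c => String.ofList [c]
                  | none => ""
        let lo := PySem.Str.lower c0
        let up := PySem.Str.upper c0
        if lo == up then [lo] else [lo, up])) [] r []) := by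
  have hmap : (apellidos.map (fun apellido =>
        match PySem.Str.pyGet? apellido 0 with
        | some c => String.ofList [c]
        | none => "")).map combTuple =
      apellidos.map (fun a =>
        let c0 := match PySem.Str.pyGet? a 0 with
                  | some c => String.ofList [c]
                  | none => ""
        let lo := PySem.Str.lower c0
        let up := PySem.Str.upper c0
        if lo == up then [lo] else [lo, up]) := by
    rw [List.map_map]
    apply List.map_congr_left
    intro a ha
    obtain ⟨c, cs, he, hg⟩ := pyGet_zero_of_ne_empty (hpre a ha)
    simp only [Function.comp_def, hg]
    exact combTuple_single c
  have hcoh : ∀ t ∈ (apellidos.map (fun apellido =>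
        match PySem.Str.pyGet? apellido 0 with
        | some c => String.ofList [c]
        | none => "")).map combTuple, Coh t := by
    intro t ht
    rw [List.map_map] at ht
    obtain ⟨a, ha, rfl⟩ := List.mem_map.mp ht
    obtain ⟨c, cs, he, hg⟩ := pyGet_zero_of_ne_empty (hpre a ha)
    simp only [Function.comp_def, hg]
    exact coh_combTuple_single c
  rw [combinaciones]
  rw [← hmap]
  have hlen : ((apellidos.map (fun apellido =>
        match PySem.Str.pyGet? apellido 0 with
        | some c => String.ofList [c]
        | none => "")).map combTuple).length + 1 - 1 =
      ((apellidos.map (fun apellido =>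
        match PySem.Str.pyGet? apellido 0 with
        | some c => String.ofList [c]
        | none => "")).map combTuple).length := by omega
  rw [hlen]
  apply List.flatMap_congr
  intro r _
  exact perRank_eq _ hcoh r

-- ===== VERDICT (by name: the statement is the Claim_ definition above) =====
theorem generador_combi_apellidos_spec : Claim_equal_generador_combi_apellidos := by
  intro d hdom hpre
  unfold Spec_generador_combi_apellidos
  unfold Pre_generador_combi_apellidos at hpre
  unfold generador_combi_apellidos generador_combi_apellidos_alt
  cases hget : PySem.Dict.get? (PySem.Dict.mk d) "apellidos" with
  | none => dsimp only
  | some apellidos =>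
    rw [hget] at hpre
    simp only [Option.getD_some] at hpre
    dsimp only
    by_cases he : List.isEmpty apellidos
    · rw [if_pos he, if_pos he]
    · rw [if_neg he, if_neg he]
      rw [main_eq apellidos (fun s hs h0 => hpre s hs h0)]
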